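-- pv_equiv track=rewrite | github.com/Gagniuc/Vertical-chart-from-array-with-random-values-at-each-run | src/Ex. (198).py | SMC
-- ===== SOURCE A (Python) =====
-- def SMC(a):
--     n = len(a)
--     m = len(a[0])
--     r = ''
--
--     for i in range(n + 2):
--         for j in range(m):
--             if i < n:
--                 r += a[i][j]
--             if i == n:
--                 r += '|'
--             if i > n:
--                 r += str(j + 1)
--         if i == n:
--             r += '\n'
--         if i < n:
--             r += "_" + str(n - i) + "\n"
--
--     return r
-- ===== SOURCE B (Python) =====
-- def SMC(a):
--     n = len(a)
--     m = len(a[0])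
--     rows = [''.join(a[i][j] for j in range(m)) + '_' + str(n - i) for i in range(n)]
--     return '\n'.join(rows + ['|' * m]) + '\n' + ''.join(str(j + 1) for j in range(m))
-- ===== Notes on version B (the rewrite author's own statement) =====
-- stated objective: simpler
-- what changed: A builds the output in one merged loop over range(n+2) whose body dispatches on i<n / i==n / i>n per cell; B builds the three sections independently (grid-row strings via comprehensions, the bar as '|'*m, the numbering line) and joins them with '\n'.
-- outside the precondition, e.g. on SMC([]): A raises IndexError, B raises IndexError; on SMC([['a', 'b'], ['c']]): A raises IndexError, B raises IndexError
import Mathlib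
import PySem

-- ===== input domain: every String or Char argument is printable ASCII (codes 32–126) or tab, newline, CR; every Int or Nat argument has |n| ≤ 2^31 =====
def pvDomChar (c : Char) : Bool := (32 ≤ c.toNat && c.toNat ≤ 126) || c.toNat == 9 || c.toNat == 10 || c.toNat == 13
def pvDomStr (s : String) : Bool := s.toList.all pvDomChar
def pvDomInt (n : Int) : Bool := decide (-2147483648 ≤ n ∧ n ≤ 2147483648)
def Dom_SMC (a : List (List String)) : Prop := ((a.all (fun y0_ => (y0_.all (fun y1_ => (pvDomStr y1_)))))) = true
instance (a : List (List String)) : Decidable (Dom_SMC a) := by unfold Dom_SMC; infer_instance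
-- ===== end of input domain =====

-- B builds the three sections (grid rows, bar, numbering) independently and joins them,
-- instead of A's single merged loop over range(n+2) with i<n / i==n / i>n branch dispatch (objective: simpler).

-- ===== PORT A =====
def SMC (a : List (List String)) : String :=
  let n : Int := a.length
  let m : Int := (PySem.List.pyGetD a 0 []).length   -- a[0]; Pre_ excludes a = []
  (PySem.List.pyRange 0 (n + 2) 1).foldl (fun r i =>
    let r := (PySem.List.pyRange 0 m 1).foldl (fun r j =>
      let r := if i < n then r ++ PySem.List.pyGetD (PySem.List.pyGetD a i []) j "" else r
      let r := if i == n then r ++ "|" else r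
      if n < i then r ++ PySem.Int.toStr (j + 1) else r) r
    let r := if i == n then r ++ "\n" else r
    if i < n then r ++ ("_" ++ PySem.Int.toStr (n - i) ++ "\n") else r) ""

-- ===== PORT B =====
def SMC_alt (a : List (List String)) : String :=
  let n : Int := a.length
  let m : Int := (PySem.List.pyGetD a 0 []).length   -- a[0]; Pre_ excludes a = []
  let rows := (PySem.List.pyRange 0 n 1).map (fun i =>
    PySem.Str.join "" ((PySem.List.pyRange 0 m 1).map (fun j =>
      PySem.List.pyGetD (PySem.List.pyGetD a i []) j "")) ++ "_" ++ PySem.Int.toStr (n - i))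
  let bar := String.ofList (List.replicate m.toNat '|')   -- exact port of '|' * m (here m ≥ 0)
  PySem.Str.join "\n" (rows ++ [bar]) ++ "\n" ++
    PySem.Str.join "" ((PySem.List.pyRange 0 m 1).map (fun j => PySem.Int.toStr (j + 1)))

-- ===== PRECONDITION & SPEC =====
-- Pre_ excludes exactly the inputs where the Python A raises IndexError: the empty list
-- (a[0] fails) and inputs with a row shorter than the first row (a[i][j] fails).
def Pre_SMC (a : List (List String)) : Prop :=
  a ≠ [] ∧ ∀ r ∈ a, (a.headD []).length ≤ r.length
instance (a : List (List String)) : Decidable (Pre_SMC a) := by unfold Pre_SMC; infer_instance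

def pvWitness_SMC : List (List String) := [["a", "bb"], ["c", "d"]]

def Spec_SMC (a : List (List String)) (out : String) : Prop := out = SMC_alt a
instance (a : List (List String)) (out : String) : Decidable (Spec_SMC a out) := by unfold Spec_SMC; infer_instance

-- ===== CLAIM (what is proved, stated in full; the proofs are below) =====
def Claim_equal_SMC : Prop := ∀ (a : List (List String)), Dom_SMC a → Pre_SMC a → Spec_SMC a (SMC a)

-- ===== LEMMAS AND PROOFS =====

theorem toList_foldl_append {α : Type} (f : α → String) (l : List α) (acc : String) :
    (l.foldl (fun r x => r ++ f x) acc).toList = acc.toList ++ l.flatMap (fun x => (f x).toList) := by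
  induction l generalizing acc with
  | nil => simp
  | cons x xs ih => simp [List.foldl_cons, ih, String.toList_append]

theorem join_nil_eq_flatten (ps : List (List Char)) :
    PySem.Chars.join [] ps = ps.flatten := by
  induction ps with
  | nil => simp [PySem.Chars.join_nil]
  | cons p rest ih =>
    cases rest with
    | nil => simp [PySem.Chars.join_singleton]
    | cons q r => rw [PySem.Chars.join_cons_cons]; simp [ih]

theorem join_append_sep (sep : List Char) (ps : List (List Char)) (h : ps ≠ []) :
    PySem.Chars.join sep ps ++ sep = ps.flatMap (fun p => p ++ sep) := by
  induction ps with
  | nil => simp at h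
  | cons p rest ih =>
    cases rest with
    | nil => simp [PySem.Chars.join_singleton]
    | cons q r =>
      rw [PySem.Chars.join_cons_cons, List.append_assoc, List.append_assoc, ih (by simp)]
      simp

theorem grid_toList (n m : Int) (cell : Int → Int → String) (l : List Int)
    (h : ∀ i ∈ l, i < n) (acc : String) :
    (l.foldl (fun r i =>
      let r := (PySem.List.pyRange 0 m 1).foldl (fun r j =>
        let r := if i < n then r ++ cell i j else r
        let r := if i == n then r ++ "|" else r
        if n < i then r ++ PySem.Int.toStr (j + 1) else r) r
      let r := if i == n then r ++ "\n" else r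
      if i < n then r ++ ("_" ++ PySem.Int.toStr (n - i) ++ "\n") else r) acc).toList
    = acc.toList ++ l.flatMap (fun i =>
        (PySem.List.pyRange 0 m 1).flatMap (fun j => (cell i j).toList)
        ++ ("_".toList ++ (PySem.Int.toStr (n - i)).toList ++ "\n".toList)) := by
  induction l generalizing acc with
  | nil => simp
  | cons i t ih =>
    have hi : i < n := h i (by simp)
    have hne : (i == n) = false := by simp; omega
    have hgt : ¬ (n < i) := by omega
    simp only [List.foldl_cons, hi, hne, hgt, if_true, Bool.false_eq_true, if_false]
    rw [ih (fun x hx => h x (by simp [hx]))]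
    rw [String.toList_append, toList_foldl_append (fun j => cell i j)]
    simp [String.toList_append, List.append_assoc]

theorem flatMap_const_singleton (c : Char) (l : List Int) :
    l.flatMap (fun _ => [c]) = List.replicate l.length c := by
  induction l with
  | nil => simp
  | cons x t ih => simp [ih, List.replicate_succ]

theorem range_split (n : Int) (hn : 0 ≤ n) :
    PySem.List.pyRange 0 (n + 2) 1 = PySem.List.pyRange 0 n 1 ++ [n, n + 1] := by
  rw [PySem.List.pyRange_one_append 0 n (n + 2) hn (by omega),
    PySem.List.pyRange_one_cons (show n < n + 2 by omega),
    PySem.List.pyRange_one_cons (show n + 1 < n + 2 by omega),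
    PySem.List.pyRange_one_eq_nil (show n + 2 ≤ n + 1 + 1 by omega)]

theorem core (n m : Int) (hn : 0 ≤ n) (cell : Int → Int → String) :
    (PySem.List.pyRange 0 (n + 2) 1).foldl (fun r i =>
      let r := (PySem.List.pyRange 0 m 1).foldl (fun r j =>
        let r := if i < n then r ++ cell i j else r
        let r := if i == n then r ++ "|" else r
        if n < i then r ++ PySem.Int.toStr (j + 1) else r) r
      let r := if i == n then r ++ "\n" else r
      if i < n then r ++ ("_" ++ PySem.Int.toStr (n - i) ++ "\n") else r) ""
    =
    PySem.Str.join "\n" (((PySem.List.pyRange 0 n 1).map (fun i =>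
        PySem.Str.join "" ((PySem.List.pyRange 0 m 1).map (fun j => cell i j)) ++ "_" ++ PySem.Int.toStr (n - i)))
      ++ [String.ofList (List.replicate m.toNat '|')]) ++ "\n" ++
      PySem.Str.join "" ((PySem.List.pyRange 0 m 1).map (fun j => PySem.Int.toStr (j + 1))) := by
  apply String.toList_inj.mp
  rw [range_split n hn, List.foldl_append]
  simp only [List.foldl_cons, List.foldl_nil]
  have h1 : ¬ (n < n) := lt_irrefl n
  have h2 : (n == n) = true := by simp
  have h3 : n < n + 1 := by omega
  have h4 : ((n + 1 : Int) == n) = false := by simp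
  have h5 : ¬ (n + 1 < n) := by omega
  simp only [h1, h2, h3, h4, h5, if_true, if_false, Bool.false_eq_true]
  rw [toList_foldl_append (fun j => PySem.Int.toStr (j + 1)), String.toList_append,
    toList_foldl_append (fun _ => ("|" : String)),
    grid_toList n m cell _ (fun i hi => (PySem.List.mem_pyRange_one.mp hi).2) ""]
  -- B side
  rw [String.toList_append, String.toList_append, PySem.Str.toList_join,
    join_append_sep _ _ (by simp)]
  simp [PySem.Str.toList_join, join_nil_eq_flatten, String.toList_append, List.append_assoc,
    List.flatMap_map, Function.comp_def, ← List.flatMap_def, PySem.Int.toList_toStr,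
    flatMap_const_singleton]

-- ===== VERDICT (by name: the statement is the Claim_ definition above) =====
theorem SMC_spec : Claim_equal_SMC := by
  intro a _ _
  unfold Spec_SMC
  simp only [SMC, SMC_alt]
  exact core (a.length : Int) ((PySem.List.pyGetD a 0 []).length : Int)
    (by positivity)
    (fun i j => PySem.List.pyGetD (PySem.List.pyGetD a i []) j "")
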